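-- pv_equiv track=rewrite | github.com/mombe090/mombe090.github.io | tools/fix_markdown.py | fix_trailing_spaces
-- ===== SOURCE A (Python) =====
-- def fix_trailing_spaces(content):
--     """Fix trailing spaces (MD009)"""
--     lines = content.split('\n')
--     fixed_lines = []
--     for line in lines:
--         # Remove trailing spaces unless they are exactly 2 (which is valid for line breaks)
--         stripped = line.rstrip()
--         if line.endswith('  ') and not line.endswith('   '):
--             # Keep intentional line breaks
--             fixed_lines.append(stripped + '  ')
--         else:
--             fixed_lines.append(stripped)
--     return '\n'.join(fixed_lines)
-- ===== SOURCE B (Python) =====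
-- def fix_trailing_spaces(content):
--     """Fix trailing spaces (MD009) — single pass over the characters, no line list/join."""
--     out = []
--     run = []  # pending run of non-newline whitespace
--     for ch in content:
--         if ch == '\n':
--             if run[-2:] == [' ', ' '] and run[-3:] != [' ', ' ', ' ']:
--                 out.append('  ')
--             out.append('\n')
--             run = []
--         elif ch.isspace():
--             run.append(ch)
--         else:
--             out.extend(run)
--             run = []
--             out.append(ch)
--     if run[-2:] == [' ', ' '] and run[-3:] != [' ', ' ', ' ']:
--         out.append('  ')
--     return ''.join(out)
-- ===== Notes on version B (the rewrite author's own statement) =====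
-- stated objective: alternative
-- what changed: Replaced split-into-lines / per-line rstrip+endswith / join with a single character-level pass that buffers each pending run of non-newline whitespace and, at a newline or end of input, emits two spaces exactly when the run ends in two spaces not preceded by a third; no list of lines is ever built.
import Mathlib
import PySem

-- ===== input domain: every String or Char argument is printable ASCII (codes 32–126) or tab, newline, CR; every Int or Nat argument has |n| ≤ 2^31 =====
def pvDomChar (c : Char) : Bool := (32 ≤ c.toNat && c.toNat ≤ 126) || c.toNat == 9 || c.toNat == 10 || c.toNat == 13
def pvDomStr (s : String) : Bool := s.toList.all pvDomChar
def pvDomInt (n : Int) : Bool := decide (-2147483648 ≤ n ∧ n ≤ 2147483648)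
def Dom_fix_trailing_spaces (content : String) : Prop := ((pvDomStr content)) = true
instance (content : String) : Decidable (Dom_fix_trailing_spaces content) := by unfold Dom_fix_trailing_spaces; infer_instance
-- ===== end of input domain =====

-- B replaces A's split/per-line-fix/join with a single character-level pass buffering pending whitespace runs (objective: alternative structure, same cost).

-- ===== PORT A =====
-- the body of A's loop: rstrip the line, keep an exactly-two-space line break
def pvALine (line : List Char) : List Char :=
  let stripped := PySem.Chars.rstrip line
  if PySem.Chars.endswith line [' ', ' '] && !(PySem.Chars.endswith line [' ', ' ', ' ']) then
    stripped ++ [' ', ' ']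
  else
    stripped

def fix_trailing_spaces (content : String) : String :=
  let lines := PySem.Chars.splitOn content.toList ['\n']
  let fixed := lines.foldl (fun acc line => acc ++ [pvALine line]) ([] : List (List Char))
  String.ofList (PySem.Chars.join ['\n'] fixed)

-- ===== PORT B =====
-- Source B's end-of-line test: run[-2:] == [' ',' '] and run[-3:] != [' ',' ',' ']
def pvBCond (run : List Char) : Bool :=
  (PySem.List.slice run (some (-2)) none == [' ', ' ']) &&
  !(PySem.List.slice run (some (-3)) none == [' ', ' ', ' '])

-- Source B's loop: out = emitted output, run = pending non-newline whitespace
def pvBLoop : List Char → List Char → List Char → List Char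
  | [], out, run => out ++ (if pvBCond run then [' ', ' '] else [])
  | c :: t, out, run =>
    if c = '\n' then
      pvBLoop t ((out ++ (if pvBCond run then [' ', ' '] else [])) ++ ['\n']) []
    else if PySem.Chars.isspace c then
      pvBLoop t out (run ++ [c])
    else
      pvBLoop t ((out ++ run) ++ [c]) []

def fix_trailing_spaces_alt (content : String) : String :=
  String.ofList (pvBLoop content.toList [] [])

-- ===== PRECONDITION & SPEC =====
def Spec_fix_trailing_spaces (content : String) (out : String) : Prop := out = fix_trailing_spaces_alt content
instance (content : String) (out : String) : Decidable (Spec_fix_trailing_spaces content out) := by unfold Spec_fix_trailing_spaces; infer_instance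

-- ===== CLAIM (what is proved, stated in full; the proofs are below) =====
def Claim_equal_fix_trailing_spaces : Prop := ∀ (content : String), Dom_fix_trailing_spaces content → Spec_fix_trailing_spaces content (fix_trailing_spaces content)

-- ===== LEMMAS AND PROOFS =====

-- splitting at '\n', structurally
def pvSegs : List Char → List (List Char)
  | [] => [[]]
  | c :: t => if c = '\n' then [] :: pvSegs t else (pvSegs t).modifyHead (c :: ·)

theorem pvSegs_ne_nil (l : List Char) : pvSegs l ≠ [] := by
  cases l with
  | nil => simp [pvSegs]
  | cons c t =>
    simp only [pvSegs]
    split_ifs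
    · simp
    · have := pvSegs_ne_nil t
      cases h : pvSegs t with
      | nil => exact absurd h this
      | cons s ss => simp [List.modifyHead]

theorem pvSegs_append (x l : List Char) (hx : '\n' ∉ x) :
    pvSegs (x ++ l) = (pvSegs l).modifyHead (x ++ ·) := by
  induction x with
  | nil =>
    cases h : pvSegs l with
    | nil => exact absurd h (pvSegs_ne_nil l)
    | cons s ss => simp [h]
  | cons c t ih =>
    have hc : c ≠ '\n' := fun h => hx (by simp [h])
    have ht : '\n' ∉ t := fun h => hx (by simp [h])
    simp only [List.cons_append, pvSegs, if_neg hc, ih ht]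
    cases h : pvSegs l with
    | nil => exact absurd h (pvSegs_ne_nil l)
    | cons s ss => simp

-- splitOn with sep = "\n" computes pvSegs
theorem pvSplitOn_go_eq (fuel : Nat) : ∀ (l cur : List Char) (acc : List (List Char)),
    l.length < fuel →
    PySem.Chars.splitOn.go ['\n'] fuel l cur acc
      = acc.reverse ++ (pvSegs l).modifyHead (cur.reverse ++ ·) := by
  induction fuel with
  | zero => intro l cur acc h; omega
  | succ n ih =>
    intro l cur acc h
    cases l with
    | nil => simp [PySem.Chars.splitOn.go, pvSegs]
    | cons c t =>
      by_cases hc : c = '\n'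
      · subst hc
        have hpre : List.isPrefixOf ['\n'] ('\n' :: t) = true := by simp [List.isPrefixOf]
        rw [PySem.Chars.splitOn.go]
        simp only [hpre, if_pos, List.length_cons, List.length_nil, List.drop_succ_cons,
          List.drop_zero]
        rw [ih t [] (cur.reverse :: acc) (by simpa using Nat.lt_of_succ_lt_succ h)]
        cases hs : pvSegs t with
        | nil => exact absurd hs (pvSegs_ne_nil t)
        | cons s ss => simp [pvSegs, hs]
      · have hpre : List.isPrefixOf ['\n'] (c :: t) = false := by
          simp [List.isPrefixOf]; exact fun h' => hc h'.symm
        rw [PySem.Chars.splitOn.go]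
        simp only [hpre, Bool.false_eq_true, if_false]
        rw [ih t (c :: cur) acc (by simpa using Nat.lt_of_succ_lt_succ h)]
        cases hs : pvSegs t with
        | nil => exact absurd hs (pvSegs_ne_nil t)
        | cons s ss => simp [pvSegs, hs, if_neg hc]

theorem pvSplitOn_eq_segs (l : List Char) : PySem.Chars.splitOn l ['\n'] = pvSegs l := by
  have := pvSplitOn_go_eq (l.length + 1) l [] [] (by omega)
  simp only [PySem.Chars.splitOn, this, List.reverse_nil, List.nil_append]
  cases h : pvSegs l with
  | nil => exact absurd h (pvSegs_ne_nil l)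
  | cons s ss => simp

theorem pvFoldl_append {α β : Type} (f : α → β) :
    ∀ (l : List α) (acc : List β),
      l.foldl (fun acc x => acc ++ [f x]) acc = acc ++ l.map f := by
  intro l
  induction l with
  | nil => simp
  | cons x t ih => intro acc; simp [List.foldl, ih]

-- the shared end-of-line condition, and its reverse form
def pvCondA (run : List Char) : Bool :=
  PySem.Chars.endswith run [' ', ' '] && !(PySem.Chars.endswith run [' ', ' ', ' '])

def pvCondR : List Char → Bool
  | a :: b :: rest => a == ' ' && b == ' ' && !(rest.head? == some ' ')
  | _ => false

theorem pvBool_ext (x y : Bool) (h : x = true ↔ y = true) : x = y := by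
  cases x <;> cases y <;> simp_all

theorem pvBeq_comm (a b : Char) : (a == b) = (b == a) := by
  apply pvBool_ext
  simp only [beq_iff_eq]
  exact eq_comm

theorem pvPrefix_cond (r : List Char) :
    (List.isPrefixOf [' ', ' '] r && !(List.isPrefixOf [' ', ' ', ' '] r)) = pvCondR r := by
  match r with
  | [] => rfl
  | [a] => simp [List.isPrefixOf, pvCondR]
  | a :: b :: rest =>
    cases rest with
    | nil =>
      by_cases ha : a = ' ' <;> by_cases hb : b = ' ' <;>
        simp [List.isPrefixOf, pvCondR, ha, hb, pvBeq_comm]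
    | cons c r3 =>
      by_cases ha : a = ' ' <;> by_cases hb : b = ' ' <;> by_cases hcq : c = ' ' <;>
        simp [List.isPrefixOf, pvCondR, ha, hb, hcq, pvBeq_comm] <;>
        first
          | exact mt Eq.symm ha
          | exact mt Eq.symm hb
          | exact mt Eq.symm hcq
          | (cases a == ' ' <;> cases b == ' ' <;> cases c == ' ' <;> rfl)

theorem pvCondA_eq_condR (run : List Char) : pvCondA run = pvCondR run.reverse := by
  unfold pvCondA
  simp only [PySem.Chars.endswith, List.isSuffixOf]
  have h2 : ([' ', ' '] : List Char).reverse = [' ', ' '] := rfl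
  have h3 : ([' ', ' ', ' '] : List Char).reverse = [' ', ' ', ' '] := rfl
  rw [h2, h3, pvPrefix_cond]

theorem pvBCond_eq_condA (run : List Char) : pvBCond run = pvCondA run := by
  unfold pvBCond pvCondA
  have e2 : PySem.List.slice run (some (-2)) none = List.drop (run.length - 2) run :=
    PySem.List.slice_from_neg_ofNat run 2 (by omega)
  have e3 : PySem.List.slice run (some (-3)) none = List.drop (run.length - 3) run :=
    PySem.List.slice_from_neg_ofNat run 3 (by omega)
  rw [e2, e3]
  have b2 : (List.drop (run.length - 2) run == [' ', ' ']) = PySem.Chars.endswith run [' ', ' '] := by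
    apply pvBool_ext
    rw [beq_iff_eq, PySem.Chars.endswith_iff, List.suffix_iff_eq_drop]
    constructor <;> intro h <;> simp_all
  have b3 : (List.drop (run.length - 3) run == [' ', ' ', ' ']) = PySem.Chars.endswith run [' ', ' ', ' '] := by
    apply pvBool_ext
    rw [beq_iff_eq, PySem.Chars.endswith_iff, List.suffix_iff_eq_drop]
    constructor <;> intro h <;> simp_all
  rw [b2, b3]

theorem pvRstrip_ws (run : List Char) (h : ∀ c ∈ run, PySem.Chars.isspace c = true) :
    PySem.Chars.rstrip run = [] := by
  unfold PySem.Chars.rstrip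
  have : List.dropWhile PySem.Chars.isspace run.reverse = [] := by
    rw [List.dropWhile_eq_nil_iff]
    intro x hx
    exact h x (List.mem_reverse.mp hx)
  rw [this, List.reverse_nil]

theorem pvALine_ws (run : List Char) (h : ∀ c ∈ run, PySem.Chars.isspace c = true) :
    pvALine run = if pvCondA run then [' ', ' '] else [] := by
  unfold pvALine pvCondA
  rw [pvRstrip_ws run h]
  split_ifs <;> simp

theorem pvRstrip_append (x f : List Char) (c : Char) (hc : PySem.Chars.isspace c = false) :
    PySem.Chars.rstrip (x ++ c :: f) = x ++ c :: PySem.Chars.rstrip f := by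
  unfold PySem.Chars.rstrip
  have hrev : (x ++ c :: f).reverse = f.reverse ++ (c :: x.reverse) := by
    simp
  rw [hrev, List.dropWhile_append]
  have hdc : List.dropWhile PySem.Chars.isspace (c :: x.reverse) = c :: x.reverse := by
    rw [List.dropWhile_cons_of_neg (by simp [hc])]
  split_ifs with hemp
  · rw [hdc]
    have : List.dropWhile PySem.Chars.isspace f.reverse = [] := by
      simpa [List.isEmpty_iff] using hemp
    simp [this]
  · simp

theorem pvCond_append (x f : List Char) (c : Char) (hc : PySem.Chars.isspace c = false) :
    pvCondA (x ++ c :: f) = pvCondA f := by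
  have hcs : c ≠ ' ' := by
    intro h; rw [h] at hc; exact absurd hc (by decide)
  rw [pvCondA_eq_condR, pvCondA_eq_condR]
  have hrev : (x ++ c :: f).reverse = f.reverse ++ (c :: x.reverse) := by simp
  rw [hrev]
  match hf : f.reverse with
  | [] => cases x.reverse with
    | nil => simp [pvCondR]
    | cons a r => simp [pvCondR, hcs]
  | [a] =>
    simp [pvCondR]
    exact fun _ h => absurd h hcs
  | a :: b :: r =>
    cases r with
    | nil => simp [pvCondR, hcs]
    | cons d r2 => simp [pvCondR]

theorem pvALine_append (x f : List Char) (c : Char) (hc : PySem.Chars.isspace c = false) :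
    pvALine (x ++ c :: f) = x ++ c :: pvALine f := by
  unfold pvALine
  have hcond : (PySem.Chars.endswith (x ++ c :: f) [' ', ' '] &&
      !(PySem.Chars.endswith (x ++ c :: f) [' ', ' ', ' '])) =
      (PySem.Chars.endswith f [' ', ' '] && !(PySem.Chars.endswith f [' ', ' ', ' '])) :=
    pvCond_append x f c hc
  rw [hcond, pvRstrip_append x f c hc]
  split_ifs <;> simp

-- A's whole computation over a raw char list
def pvP (l : List Char) : List Char :=
  PySem.Chars.join ['\n'] ((pvSegs l).map pvALine)

theorem pvSegs_no_nl (run : List Char) (h : '\n' ∉ run) : pvSegs run = [run] := by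
  have := pvSegs_append run [] h
  simpa [pvSegs] using this

theorem pvP_ws (run : List Char) (h : ∀ c ∈ run, PySem.Chars.isspace c = true ∧ c ≠ '\n') :
    pvP run = if pvCondA run then [' ', ' '] else [] := by
  unfold pvP
  rw [pvSegs_no_nl run (fun hm => (h _ hm).2 rfl)]
  simp only [List.map_cons, List.map_nil, PySem.Chars.join_singleton]
  exact pvALine_ws run (fun c hc => (h c hc).1)

theorem pvJoin_cons (a : List Char) (l : List (List Char)) (hl : l ≠ []) :
    PySem.Chars.join ['\n'] (a :: l) = a ++ '\n' :: PySem.Chars.join ['\n'] l := by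
  cases l with
  | nil => exact absurd rfl hl
  | cons b r => rw [PySem.Chars.join_cons_cons]; simp

theorem pvP_newline (x t : List Char) (hx : '\n' ∉ x) :
    pvP (x ++ '\n' :: t) = pvALine x ++ '\n' :: pvP t := by
  unfold pvP
  rw [pvSegs_append x ('\n' :: t) hx]
  have hseg : pvSegs ('\n' :: t) = [] :: pvSegs t := by simp [pvSegs]
  rw [hseg]
  simp only [List.modifyHead, List.append_nil, List.map_cons]
  exact pvJoin_cons (pvALine x) ((pvSegs t).map pvALine)
    (by simpa using pvSegs_ne_nil t)

theorem pvJoin_cons_prepend (x y : List Char) (r : List (List Char)) :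
    PySem.Chars.join ['\n'] ((x ++ y) :: r) = x ++ PySem.Chars.join ['\n'] (y :: r) := by
  cases r with
  | nil => rw [PySem.Chars.join_singleton, PySem.Chars.join_singleton]
  | cons b rr => rw [PySem.Chars.join_cons_cons, PySem.Chars.join_cons_cons]; simp

theorem pvP_nonws (run t : List Char) (c : Char) (hc : PySem.Chars.isspace c = false)
    (hx : '\n' ∉ run) :
    pvP (run ++ c :: t) = run ++ c :: pvP t := by
  have hcn : c ≠ '\n' := by
    intro h; rw [h] at hc; exact absurd hc (by decide)
  unfold pvP
  have hx' : '\n' ∉ run ++ [c] := by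
    intro hm
    rcases List.mem_append.mp hm with h1 | h1
    · exact hx h1
    · simp only [List.mem_singleton] at h1
      exact hcn h1.symm
  have : run ++ c :: t = (run ++ [c]) ++ t := by simp
  rw [this, pvSegs_append (run ++ [c]) t hx']
  cases hs : pvSegs t with
  | nil => exact absurd hs (pvSegs_ne_nil t)
  | cons s ss =>
    simp only [List.modifyHead, List.map_cons]
    have : (run ++ [c]) ++ s = run ++ (c :: s) := by simp
    rw [this, pvALine_append run s c hc]
    have : (run ++ c :: pvALine s) = (run ++ [c]) ++ pvALine s := by simp
    rw [this, pvJoin_cons_prepend (run ++ [c]) (pvALine s) (ss.map pvALine)]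
    simp

theorem pvBLoop_eq (l : List Char) : ∀ (out run : List Char),
    (∀ c ∈ run, PySem.Chars.isspace c = true ∧ c ≠ '\n') →
    pvBLoop l out run = out ++ pvP (run ++ l) := by
  induction l with
  | nil =>
    intro out run h
    simp only [pvBLoop, List.append_nil]
    rw [pvP_ws run h, pvBCond_eq_condA]
  | cons c t ih =>
    intro out run h
    by_cases hc : c = '\n'
    · subst hc
      simp only [pvBLoop, if_pos]
      have hnil : ∀ d ∈ ([] : List Char), PySem.Chars.isspace d = true ∧ d ≠ '\n' := by simp
      rw [ih ((out ++ (if pvBCond run then [' ', ' '] else [])) ++ ['\n']) [] hnil,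
        pvP_newline run t (fun hm => (h _ hm).2 rfl)]
      rw [pvALine_ws run (fun c hc => (h c hc).1), pvBCond_eq_condA]
      simp [pvP]
    · by_cases hw : PySem.Chars.isspace c = true
      · simp only [pvBLoop, if_neg hc, hw, if_pos]
        have hrun : ∀ d ∈ run ++ [c], PySem.Chars.isspace d = true ∧ d ≠ '\n' := by
          intro d hd
          rcases List.mem_append.mp hd with h1 | h1
          · exact h d h1
          · simp only [List.mem_singleton] at h1
            exact h1 ▸ ⟨hw, hc⟩
        rw [ih out (run ++ [c]) hrun]
        simp
      · have hw' : PySem.Chars.isspace c = false := by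
          cases hb : PySem.Chars.isspace c
          · rfl
          · exact absurd hb hw
        simp only [pvBLoop, if_neg hc, hw', Bool.false_eq_true, if_false]
        have hnil : ∀ d ∈ ([] : List Char), PySem.Chars.isspace d = true ∧ d ≠ '\n' := by simp
        rw [ih ((out ++ run) ++ [c]) [] hnil, pvP_nonws run t c hw' (fun hm => (h _ hm).2 rfl)]
        simp

-- ===== VERDICT (by name: the statement is the Claim_ definition above) =====
theorem fix_trailing_spaces_spec : Claim_equal_fix_trailing_spaces := by
  intro content _
  unfold Spec_fix_trailing_spaces fix_trailing_spaces fix_trailing_spaces_alt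
  rw [pvBLoop_eq content.toList [] [] (by simp)]
  simp only [pvSplitOn_eq_segs, pvFoldl_append, List.nil_append, pvP]
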